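-- pv_equiv track=rewrite | github.com/eliottcassidy2000/math | 04-computation/proof_n8_mp.py | verify_chunk
-- ===== SOURCE A (Python) =====
-- from itertools import combinations
--
-- N = 8
--
-- FULL = (1 << N) - 1
--
-- ARC_PAIRS = [(a, b) for a in range(N) for b in range(a+1, N) if (a,b) != (0,1)]
--
-- def ham_count(T):
--     dp = [[0] * N for _ in range(1 << N)]
--     for v in range(N):
--         dp[1 << v][v] = 1
--     for mask in range(1, 1 << N):
--         for last in range(N):
--             c = dp[mask][last]
--             if c == 0:
--                 continue
--             for nxt in range(N):
--                 if mask & (1 << nxt):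
--                     continue
--                 if T[last * N + nxt]:
--                     dp[mask | (1 << nxt)][nxt] += c
--     return sum(dp[FULL])
--
-- def count_directed_cycles(T, combo):
--     m = len(combo)
--     if m < 3:
--         return 0
--     start = combo[0]
--     others = list(combo[1:])
--     mo = len(others)
--     ofull = (1 << mo) - 1
--     dp = [[0] * mo for _ in range(1 << mo)]
--     for i, o in enumerate(others):
--         if T[start * N + o]:
--             dp[1 << i][i] = 1
--     for omask in range(1, ofull + 1):
--         for li in range(mo):
--             c = dp[omask][li]
--             if c == 0:
--                 continue
--             for ni in range(mo):
--                 if omask & (1 << ni):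
--                     continue
--                 if T[others[li] * N + others[ni]]:
--                     dp[omask | (1 << ni)][ni] += c
--     total = 0
--     for li in range(mo):
--         if T[others[li] * N + start]:
--             total += dp[ofull][li]
--     return total
--
-- def compute_ocf(T):
--     cycle_info = []
--     for length in range(3, N + 1, 2):
--         for combo in combinations(range(N), length):
--             vmask = 0
--             for v in combo:
--                 vmask |= (1 << v)
--             cnt = count_directed_cycles(T, combo)
--             if cnt > 0:
--                 cycle_info.append((vmask, cnt))
--
--     total_cycles = sum(cnt for _, cnt in cycle_info)
--     vd_pairs = 0
--     nc = len(cycle_info)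
--     for i in range(nc):
--         for j in range(i + 1, nc):
--             if cycle_info[i][0] & cycle_info[j][0] == 0:
--                 vd_pairs += cycle_info[i][1] * cycle_info[j][1]
--
--     return 1 + 2 * total_cycles + 4 * vd_pairs
--
-- def verify_chunk(args):
--     start_mask, end_mask = args
--     fails = 0
--     fail_examples = []
--     for mask in range(start_mask, end_mask):
--         T = [0] * (N * N)
--         T[0 * N + 1] = 1
--         for bit, (a, b) in enumerate(ARC_PAIRS):
--             if mask & (1 << bit):
--                 T[a * N + b] = 1
--             else:
--                 T[b * N + a] = 1
--
--         ht = ham_count(T)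
--         it = compute_ocf(T)
--         if ht != it:
--             fails += 1
--             if len(fail_examples) < 3:
--                 fail_examples.append((mask, ht, it))
--
--     return end_mask - start_mask, fails, fail_examples
-- ===== SOURCE B (Python) =====
-- from itertools import combinations
--
-- N = 8
--
-- FULL = (1 << N) - 1
--
-- ARC_PAIRS = [(a, b) for a in range(N) for b in range(a+1, N) if (a, b) != (0, 1)]
--
-- def ham_count(T):
--     def paths(S, l):
--         # number of directed paths covering exactly the vertex set S and ending at l
--         if not (S >> l) & 1:
--             return 0
--         if S == (1 << l):
--             return 1
--         R = S ^ (1 << l)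
--         return sum(paths(R, p) for p in range(N) if p != l and (S >> p) & 1 and T[p * N + l])
--     return sum(paths(FULL, l) for l in range(N))
--
-- def count_directed_cycles(T, combo):
--     m = len(combo)
--     if m < 3:
--         return 0
--     start = combo[0]
--     others = list(combo[1:])
--     mo = len(others)
--     def paths(S, li):
--         # paths start -> ... -> others[li] visiting exactly {others[i] : i in S}
--         if not (S >> li) & 1:
--             return 0
--         if S == (1 << li):
--             return 1 if T[start * N + others[li]] else 0
--         R = S ^ (1 << li)
--         return sum(paths(R, p) for p in range(mo) if p != li and (S >> p) & 1 and T[others[p] * N + others[li]])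
--     ofull = (1 << mo) - 1
--     return sum(paths(ofull, li) for li in range(mo) if T[others[li] * N + start])
--
-- def compute_ocf(T):
--     total_cycles = 0
--     vd_pairs = 0
--     seen = []
--     for length in range(3, N + 1, 2):
--         for combo in combinations(range(N), length):
--             cnt = count_directed_cycles(T, combo)
--             if cnt > 0:
--                 vmask = 0
--                 for v in combo:
--                     vmask |= 1 << v
--                 vd_pairs += cnt * sum(c for vm, c in seen if vm & vmask == 0)
--                 seen.append((vmask, cnt))
--                 total_cycles += cnt
--     return 1 + 2 * total_cycles + 4 * vd_pairs
--
-- def verify_chunk(args):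
--     start_mask, end_mask = args
--     fails = 0
--     fail_examples = []
--     for mask in range(start_mask, end_mask):
--         T = [0] * (N * N)
--         T[0 * N + 1] = 1
--         for bit, (a, b) in enumerate(ARC_PAIRS):
--             if mask & (1 << bit):
--                 T[a * N + b] = 1
--             else:
--                 T[b * N + a] = 1
--         ht = ham_count(T)
--         it = compute_ocf(T)
--         if ht != it:
--             fails += 1
--             if len(fail_examples) < 3:
--                 fail_examples.append((mask, ht, it))
--     return end_mask - start_mask, fails, fail_examples
-- ===== Notes on version B (the rewrite author's own statement) =====
-- stated objective: simpler
-- what changed: Both bottom-up bitmask DP tables (Hamiltonian-path counting and per-subset directed-cycle counting) are replaced by direct top-down recursion on the vertex set, and compute_ocf's two-phase pass (build cycle_info, then an O(nc^2) index-pair loop) is fused into a single online accumulation of total_cycles and vd_pairs.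
import Mathlib
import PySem

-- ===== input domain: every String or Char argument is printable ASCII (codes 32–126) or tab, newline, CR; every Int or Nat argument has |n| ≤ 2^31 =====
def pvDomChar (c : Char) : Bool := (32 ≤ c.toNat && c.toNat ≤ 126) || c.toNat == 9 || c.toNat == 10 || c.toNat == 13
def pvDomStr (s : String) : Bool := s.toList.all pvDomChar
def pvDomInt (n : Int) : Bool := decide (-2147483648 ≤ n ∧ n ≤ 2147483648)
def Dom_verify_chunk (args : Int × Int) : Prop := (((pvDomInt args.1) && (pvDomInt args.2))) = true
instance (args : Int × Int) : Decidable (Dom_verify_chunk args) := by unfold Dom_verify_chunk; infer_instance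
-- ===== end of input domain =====

-- B replaces A's bottom-up bitmask DP tables by top-down recursion and fuses the
-- pairwise disjointness pass into one online accumulation; objective: simpler, not faster.

-- ===== PORT A =====
-- shared low-level helpers (identical lines of both Pythons)

/-- `a.getD i 0` : read of a Python int list cell (all reads below are in range). -/
def aget (a : Array Int) (i : Nat) : Int := a.getD i 0

/-- in-place list cell write `a[i] = v` (all writes below are in range). -/
def aset (a : Array Int) (i : Nat) (v : Int) : Array Int := a.setIfInBounds i v

/-- Python truthiness `if T[i]:` of an int cell. -/
def tget (T : Array Int) (i : Nat) : Bool := aget T i != 0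

/-- Python `mask & (1 << bit) != 0` (exact for every Int `mask`: PySem.Int.band is
    Python's infinite two's-complement `&`). -/
def arcSet (mask : Int) (bit : Nat) : Bool := PySem.Int.band mask ((2 : Int) ^ bit) != 0

/-- `ARC_PAIRS = [(a, b) for a in range(N) for b in range(a+1, N) if (a,b) != (0,1)]` -/
def ARC_PAIRS : List (Nat × Nat) :=
  (List.range 8).flatMap (fun a =>
    ((List.range' (a + 1) (8 - (a + 1))).filter (fun b => !(a == 0 && b == 1))).map (fun b => (a, b)))

/-- the tournament matrix `T` built from `mask` (both Pythons, identical lines);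
    `zipIdx` plays `enumerate` (index second). -/
def buildT (mask : Int) : Array Int :=
  (ARC_PAIRS.zipIdx).foldl
    (fun T p =>
      if arcSet mask p.2 then aset T (p.1.1 * 8 + p.1.2) 1 else aset T (p.1.2 * 8 + p.1.1) 1)
    (aset (Array.replicate 64 0) 1 1)

/-- `itertools.combinations(xs, k)` on a list (lexicographic, as itertools yields them). -/
def pyCombinations : List Nat → Nat → List (List Nat)
  | _, 0 => [[]]
  | [], _ + 1 => []
  | x :: rest, k + 1 => (pyCombinations rest k).map (x :: ·) ++ pyCombinations rest (k + 1)

/-- `vmask = 0; for v in combo: vmask |= 1 << v` (identical in both Pythons). -/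
def vmaskOf (combo : List Nat) : Nat := combo.foldl (fun v x => v ||| (1 <<< x)) 0

-- A's bottom-up DP table, shared shape of A's ham_count and count_directed_cycles
-- (generic in the table width `n`, edge test and singleton initial value; A's cycle
-- version writes the initial cell only when the entry is 1 — writing a 0 is the same table).

/-- inner loop `for nxt in range(n): ...` of A's DP (push step from row `M`, source value `c`). -/
def pushInner (n : Nat) (e : Nat → Nat → Bool) (M last : Nat) (c : Int) (dp : Array Int) : Array Int :=
  (List.range n).foldl
    (fun dp nxt =>
      if M.testBit nxt then dp
      else if e last nxt then
        aset dp ((M ||| (1 <<< nxt)) * n + nxt) (aget dp ((M ||| (1 <<< nxt)) * n + nxt) + c)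
      else dp)
    dp

/-- middle loop `for last in range(n): c = dp[mask][last]; if c == 0: continue; ...` -/
def pushMiddle (n : Nat) (e : Nat → Nat → Bool) (M : Nat) (dp : Array Int) : Array Int :=
  (List.range n).foldl
    (fun dp last =>
      let c := aget dp (M * n + last)
      if c = 0 then dp else pushInner n e M last c dp)
    dp

/-- A's DP table, flat (`dp[S][l]` at index `S*n+l`); init `dp[1<<v][v] = iv v`, then
    `for mask in range(1, 1 << n)`. -/
def pushDP (n : Nat) (e : Nat → Nat → Bool) (iv : Nat → Int) : Array Int :=
  (List.range' 1 (2 ^ n - 1)).foldl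
    (fun dp M => pushMiddle n e M dp)
    ((List.range n).foldl (fun dp v => aset dp ((1 <<< v) * n + v) (iv v))
      (Array.replicate (2 ^ n * n) 0))

/-- A's `ham_count`. -/
def hamCount (T : Array Int) : Int :=
  let dp := pushDP 8 (fun a b => tget T (a * 8 + b)) (fun _ => 1)
  (List.range 8).foldl (fun s l => s + aget dp (255 * 8 + l)) 0

/-- A's `count_directed_cycles`. -/
def countDirectedCycles (T : Array Int) (combo : List Nat) : Int :=
  if combo.length < 3 then 0
  else
    let start := combo.headD 0
    let others := combo.drop 1
    let mo := others.length
    let e := fun i j => tget T ((others.getD i 0) * 8 + others.getD j 0)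
    let iv := fun i => if tget T (start * 8 + others.getD i 0) then (1 : Int) else 0
    let ofull := 2 ^ mo - 1
    let dp := pushDP mo e iv
    (List.range mo).foldl
      (fun s li => if tget T ((others.getD li 0) * 8 + start) then s + aget dp (ofull * mo + li) else s) 0

/-- A's `compute_ocf`: build `cycle_info`, then sum the counts and run the
    index-pair double loop. -/
def computeOcf (T : Array Int) : Int :=
  let info : List (Nat × Int) :=
    (List.range' 3 3 2).foldl
      (fun acc len =>
        (pyCombinations (List.range 8) len).foldl
          (fun acc combo =>
            let vmask := vmaskOf combo
            let cnt := countDirectedCycles T combo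
            if cnt > 0 then acc ++ [(vmask, cnt)] else acc)
          acc)
      []
  let tc := info.foldl (fun s p => s + p.2) 0
  let nc := info.length
  let vd :=
    (List.range nc).foldl
      (fun s i =>
        (List.range' (i + 1) (nc - (i + 1))).foldl
          (fun s j =>
            if (info.getD i (0, 0)).1 &&& (info.getD j (0, 0)).1 = 0 then
              s + (info.getD i (0, 0)).2 * (info.getD j (0, 0)).2
            else s)
          s)
      0
  1 + 2 * tc + 4 * vd

/-- the per-chunk loop `for mask in range(start_mask, end_mask)` (identical lines of
    both Pythons, generic in the two per-tournament counters). -/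
def chunkLoop (ham ocf : Array Int → Int) (args : Int × Int) : Int × Int × List (Int × Int × Int) :=
  let st :=
    (PySem.List.pyRange args.1 args.2 1).foldl
      (fun (st : Int × List (Int × Int × Int)) mask =>
        let T := buildT mask
        let ht := ham T
        let it := ocf T
        if ht ≠ it then (st.1 + 1, if st.2.length < 3 then st.2 ++ [(mask, ht, it)] else st.2)
        else st)
      (0, [])
  (args.2 - args.1, st.1, st.2)

def verify_chunk (args : Int × Int) : Int × Int × (List (Int × Int × Int)) :=
  chunkLoop hamCount computeOcf args

-- ===== PORT B =====

/-- termination of B's recursion: removing the end vertex shrinks the set. -/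
theorem xor_pow_lt {S : Nat} (l : Nat) (h : S.testBit l = true) : S ^^^ (1 <<< l) < S := by
  apply Nat.lt_of_testBit l
  · simp [Nat.testBit_xor, h, Nat.one_shiftLeft]
  · exact h
  · intro j hj
    have hne : ¬ l = j := by omega
    simp [Nat.testBit_xor, Nat.one_shiftLeft, hne]

/-- B's `paths(S, l)` recursion (generic in `n`, edge test and base value, shared by
    B's `ham_count` and `count_directed_cycles`). -/
def recDP (n : Nat) (e : Nat → Nat → Bool) (iv : Nat → Int) (S l : Nat) : Int :=
  if h : S.testBit l then
    if S = 1 <<< l then iv l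
    else
      (List.range n).foldl
        (fun t p =>
          if p ≠ l ∧ S.testBit p = true ∧ e p l = true then
            t + recDP n e iv (S ^^^ (1 <<< l)) p
          else t)
        0
  else 0
termination_by S
decreasing_by exact xor_pow_lt l h

/-- B's `ham_count`. -/
def hamCountAlt (T : Array Int) : Int :=
  (List.range 8).foldl (fun s l => s + recDP 8 (fun a b => tget T (a * 8 + b)) (fun _ => 1) 255 l) 0

/-- B's `count_directed_cycles`. -/
def countDirectedCyclesAlt (T : Array Int) (combo : List Nat) : Int :=
  if combo.length < 3 then 0
  else
    let start := combo.headD 0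
    let others := combo.drop 1
    let mo := others.length
    let e := fun i j => tget T ((others.getD i 0) * 8 + others.getD j 0)
    let iv := fun i => if tget T (start * 8 + others.getD i 0) then (1 : Int) else 0
    let ofull := 2 ^ mo - 1
    (List.range mo).foldl
      (fun s li => if tget T ((others.getD li 0) * 8 + start) then s + recDP mo e iv ofull li else s) 0

/-- B's `compute_ocf`: one pass, accumulating `total_cycles`, `vd_pairs` and `seen` online. -/
def computeOcfAlt (T : Array Int) : Int :=
  let st :=
    (List.range' 3 3 2).foldl
      (fun st len =>
        (pyCombinations (List.range 8) len).foldl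
          (fun (st : Int × Int × List (Nat × Int)) combo =>
            let cnt := countDirectedCyclesAlt T combo
            if cnt > 0 then
              let vmask := vmaskOf combo
              (st.1 + cnt,
               st.2.1 + cnt * (st.2.2.foldl (fun s y => if y.1 &&& vmask = 0 then s + y.2 else s) 0),
               st.2.2 ++ [(vmask, cnt)])
            else st)
          st)
      ((0 : Int), (0 : Int), ([] : List (Nat × Int)))
  1 + 2 * st.1 + 4 * st.2.1

def verify_chunk_alt (args : Int × Int) : Int × Int × (List (Int × Int × Int)) :=
  chunkLoop hamCountAlt computeOcfAlt args

-- ===== PRECONDITION & SPEC =====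
def Spec_verify_chunk (args : Int × Int) (out : Int × Int × (List (Int × Int × Int))) : Prop := out = verify_chunk_alt args
instance (args : Int × Int) (out : Int × Int × (List (Int × Int × Int))) : Decidable (Spec_verify_chunk args out) := by unfold Spec_verify_chunk; infer_instance

-- ===== CLAIM (what is proved, stated in full; the proofs are below) =====
def Claim_equal_verify_chunk : Prop := ∀ (args : Int × Int), Dom_verify_chunk args → Spec_verify_chunk args (verify_chunk args)

-- ===== LEMMAS AND PROOFS =====

-- toolkit: array cells ---------------------------------------------------------

theorem aget_aset (a : Array Int) (i : Nat) (v : Int) (hi : i < a.size) (j : Nat) :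
    aget (aset a i v) j = if j = i then v else aget a j := by
  unfold aget aset
  simp only [Array.getD_eq_getD_getElem?, Array.getElem?_setIfInBounds]
  by_cases h : j = i
  · simp [h, hi]
  · have h' : ¬ i = j := fun hh => h hh.symm
    simp [h, h']

theorem size_aset (a : Array Int) (i : Nat) (v : Int) : (aset a i v).size = a.size :=
  Array.size_setIfInBounds

theorem idx_inj {n S l S' l' : Nat} (hl : l < n) (hl' : l' < n) (h : S * n + l = S' * n + l') :
    S = S' ∧ l = l' := by
  have hn : 0 < n := by omega
  have hmod : l = l' := by
    have := congrArg (· % n) h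
    simpa [Nat.mul_comm, Nat.mul_add_mod, Nat.mod_eq_of_lt hl, Nat.mod_eq_of_lt hl'] using this
  subst hmod
  exact ⟨by nlinarith, rfl⟩

-- toolkit: sums as folds -------------------------------------------------------

def sumLst {α : Type} (f : α → Int) (L : List α) : Int := L.foldl (fun s y => s + f y) 0

theorem foldl_add_init {α : Type} (f : α → Int) (L : List α) (a : Int) :
    L.foldl (fun s y => s + f y) a = a + sumLst f L := by
  induction L generalizing a with
  | nil => simp only [List.foldl_nil, sumLst]; ring
  | cons y ys ih =>
    simp only [List.foldl_cons, sumLst]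
    rw [ih, ih]
    ring

theorem sumLst_append {α : Type} (f : α → Int) (L M : List α) :
    sumLst f (L ++ M) = sumLst f L + sumLst f M := by
  unfold sumLst
  rw [List.foldl_append, foldl_add_init]
  rfl

theorem sumLst_cons {α : Type} (f : α → Int) (y : α) (L : List α) :
    sumLst f (y :: L) = f y + sumLst f L := by
  unfold sumLst
  rw [List.foldl_cons, foldl_add_init]
  simp
  rfl

theorem sumLst_congr {α : Type} {f g : α → Int} {L : List α} (h : ∀ y ∈ L, f y = g y) :
    sumLst f L = sumLst g L := by
  unfold sumLst
  exact PySem.List.foldl_congr_mem L _ _ 0 (fun acc y hy => by rw [h y hy])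

/-- `if c y then s + f y else s` is `s + (if c y then f y else 0)`. -/
theorem step_ite {α : Type} (c : α → Prop) [DecidablePred c] (f : α → Int) :
    (fun (s : Int) y => if c y then s + f y else s) = fun s y => s + (if c y then f y else 0) := by
  funext s y; split <;> simp

theorem foldl_ite_sum {α : Type} (c : α → Prop) [DecidablePred c] (f : α → Int) (L : List α) :
    (L.foldl (fun t p => if c p then t + f p else t) 0) = sumLst (fun p => if c p then f p else 0) L := by
  rw [step_ite c f]; rfl

-- toolkit: bits ----------------------------------------------------------------

theorem testBit_pow (l j : Nat) : (1 <<< l).testBit j = decide (l = j) := by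
  rw [Nat.one_shiftLeft, Nat.testBit_two_pow]

theorem or_testBit (M l j : Nat) :
    (M ||| 1 <<< l).testBit j = (M.testBit j || decide (l = j)) := by
  rw [Nat.testBit_or, testBit_pow]

theorem xor_testBit (S l j : Nat) :
    (S ^^^ 1 <<< l).testBit j = (S.testBit j ^^ decide (l = j)) := by
  rw [Nat.testBit_xor, testBit_pow]

theorem or_xor_cancel {M : Nat} (l : Nat) (h : M.testBit l = false) :
    (M ||| 1 <<< l) ^^^ 1 <<< l = M := by
  apply Nat.eq_of_testBit_eq; intro j
  rw [xor_testBit, or_testBit]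
  by_cases hj : l = j
  · subst hj
    simp [h]
  · simp [hj]

theorem xor_or_cancel {S : Nat} (l : Nat) (h : S.testBit l = true) :
    (S ^^^ 1 <<< l) ||| 1 <<< l = S := by
  apply Nat.eq_of_testBit_eq; intro j
  rw [or_testBit, xor_testBit]
  by_cases hj : l = j
  · subst hj
    simp [h]
  · simp [hj]

theorem pow_lt_pow_of_lt {l n : Nat} (hl : l < n) : 1 <<< l < 2 ^ n := by
  simpa [Nat.one_shiftLeft] using Nat.pow_lt_pow_right (by omega) hl

theorem or_pow_lt' {M l n : Nat} (hM : M < 2 ^ n) (hl : l < n) : M ||| 1 <<< l < 2 ^ n :=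
  Nat.or_lt_two_pow hM (pow_lt_pow_of_lt hl)

theorem recDP_not {n : Nat} {e : Nat → Nat → Bool} {iv : Nat → Int} {S l : Nat}
    (h : S.testBit l = false) : recDP n e iv S l = 0 := by
  rw [recDP]; simp [h]

-- the DP invariant -------------------------------------------------------------

/-- the intended content of the table cell `(S, l)` after the masks `< M` have been
    processed. -/
def cellSpec (n : Nat) (e : Nat → Nat → Bool) (iv : Nat → Int) (M S l : Nat) : Int :=
  if S.testBit l = true ∧ S ^^^ 1 <<< l < M then recDP n e iv S l else 0

def DPInv (n : Nat) (e : Nat → Nat → Bool) (iv : Nat → Int) (M : Nat) (dp : Array Int) : Prop :=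
  dp.size = 2 ^ n * n ∧
    ∀ S l, S < 2 ^ n → l < n → aget dp (S * n + l) = cellSpec n e iv M S l

theorem idx_lt {n S l : Nat} (hS : S < 2 ^ n) (hl : l < n) : S * n + l < 2 ^ n * n := by
  have h1 : S + 1 ≤ 2 ^ n := hS
  calc S * n + l < S * n + n := by omega
    _ = (S + 1) * n := by ring
    _ ≤ 2 ^ n * n := Nat.mul_le_mul_right n h1

theorem aget_replicate (m j : Nat) : aget (Array.replicate m (0 : Int)) j = 0 := by
  unfold aget
  simp [Array.getD_eq_getD_getElem?, Array.getElem?_replicate]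
  split <;> rfl

theorem or_self_testBit (M l : Nat) : (M ||| 1 <<< l).testBit l = true := by
  rw [or_testBit]; simp

theorem or_ne_self {M l : Nat} (h : M.testBit l = false) : M ||| 1 <<< l ≠ M := by
  intro heq
  have h2 := or_self_testBit M l
  rw [heq, h] at h2
  exact Bool.false_ne_true h2

theorem or_ne_pow {M l : Nat} (h1 : 1 ≤ M) (h : M.testBit l = false) :
    M ||| 1 <<< l ≠ 1 <<< l := by
  intro heq
  have h2 : (M ||| 1 <<< l) ^^^ 1 <<< l = M := or_xor_cancel l h
  rw [heq, Nat.xor_self] at h2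
  omega

theorem init_inv_aux (n : Nat) (iv : Nat → Int) (k : Nat) (hk : k ≤ n) :
    ((List.range k).foldl (fun dp v => aset dp ((1 <<< v) * n + v) (iv v))
        (Array.replicate (2 ^ n * n) 0)).size = 2 ^ n * n ∧
    ∀ S l, S < 2 ^ n → l < n →
      aget ((List.range k).foldl (fun dp v => aset dp ((1 <<< v) * n + v) (iv v))
        (Array.replicate (2 ^ n * n) 0)) (S * n + l) =
        if S = 1 <<< l ∧ l < k then iv l else 0 := by
  induction k with
  | zero =>
    refine ⟨by simp, fun S l hS hl => ?_⟩
    simp [aget_replicate]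
  | succ k ih =>
    obtain ⟨ihsz, ihval⟩ := ih (by omega)
    rw [List.range_succ, List.foldl_append]
    refine ⟨by simp [List.foldl_cons, size_aset, ihsz], fun S l hS hl => ?_⟩
    simp only [List.foldl_cons, List.foldl_nil]
    rw [aget_aset _ _ _ (by rw [ihsz]; exact idx_lt (pow_lt_pow_of_lt (by omega)) (by omega)) _]
    by_cases hidx : S * n + l = (1 <<< k) * n + k
    · obtain ⟨hS', hl'⟩ := idx_inj hl (by omega) hidx
      subst hl'
      simp [hS']
    · rw [if_neg hidx, ihval S l hS hl]
      by_cases hc : S = 1 <<< l ∧ l < k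
      · rw [if_pos hc, if_pos ⟨hc.1, Nat.lt_succ_of_lt hc.2⟩]
      · have hthis : ¬ (S = 1 <<< l ∧ l < k + 1) := by
          rintro ⟨h1, h2⟩
          rcases Nat.lt_succ_iff_lt_or_eq.mp h2 with h3 | h3
          · exact hc ⟨h1, h3⟩
          · subst h3; subst h1; exact hidx rfl
        rw [if_neg hc, if_neg hthis]

theorem init_inv (n : Nat) (e : Nat → Nat → Bool) (iv : Nat → Int) :
    DPInv n e iv 1
      ((List.range n).foldl (fun dp v => aset dp ((1 <<< v) * n + v) (iv v))
        (Array.replicate (2 ^ n * n) 0)) := by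
  obtain ⟨hsz, hval⟩ := init_inv_aux n iv n (le_refl n)
  refine ⟨hsz, fun S l hS hl => ?_⟩
  rw [hval S l hS hl]
  unfold cellSpec
  by_cases hc : S = 1 <<< l
  · subst hc
    have ht : ((1 <<< l : Nat)).testBit l = true := by rw [testBit_pow]; simp
    rw [if_pos ⟨rfl, hl⟩, if_pos ⟨ht, by rw [Nat.xor_self]; omega⟩]
    rw [recDP]
    simp [ht]
  · have h2 : ¬ (S.testBit l = true ∧ S ^^^ 1 <<< l < 1) := by
      rintro ⟨-, hx⟩
      exact hc (Nat.xor_eq_zero_iff.mp (by omega))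
    rw [if_neg (fun hx : S = 1 <<< l ∧ l < n => hc hx.1), if_neg h2]

theorem inner_inv_aux (n : Nat) (e : Nat → Nat → Bool) (M last : Nat) (c : Int) (dp : Array Int)
    (hsz : dp.size = 2 ^ n * n) (hM : M < 2 ^ n) (k : Nat) (hk : k ≤ n) :
    ((List.range k).foldl
        (fun dp nxt =>
          if M.testBit nxt then dp
          else if e last nxt then
            aset dp ((M ||| 1 <<< nxt) * n + nxt) (aget dp ((M ||| 1 <<< nxt) * n + nxt) + c)
          else dp)
        dp).size = 2 ^ n * n ∧
      ∀ S l, S < 2 ^ n → l < n →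
        aget ((List.range k).foldl
          (fun dp nxt =>
            if M.testBit nxt then dp
            else if e last nxt then
              aset dp ((M ||| 1 <<< nxt) * n + nxt) (aget dp ((M ||| 1 <<< nxt) * n + nxt) + c)
            else dp)
          dp) (S * n + l) =
          aget dp (S * n + l) +
            (if l < k ∧ M.testBit l = false ∧ S = M ||| 1 <<< l ∧ e last l = true then c else 0) := by
  induction k with
  | zero =>
    refine ⟨hsz, fun S l hS hl => ?_⟩
    simp
  | succ k ih =>
    obtain ⟨ihsz, ihval⟩ := ih (by omega)
    rw [List.range_succ, List.foldl_append]
    simp only [List.foldl_cons, List.foldl_nil]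
    cases hbit : M.testBit k with
    | true =>
      rw [if_pos rfl]
      refine ⟨ihsz, fun S l hS hl => ?_⟩
      rw [ihval S l hS hl]
      have hiff : (l < k + 1 ∧ M.testBit l = false ∧ S = M ||| 1 <<< l ∧ e last l = true) ↔
          (l < k ∧ M.testBit l = false ∧ S = M ||| 1 <<< l ∧ e last l = true) := by
        constructor
        · rintro ⟨h1, hP⟩
          rcases Nat.lt_succ_iff_lt_or_eq.mp h1 with h3 | h3
          · exact ⟨h3, hP⟩
          · subst h3; rw [hbit] at hP; exact absurd hP.1 (by simp)
        · rintro ⟨h1, hP⟩; exact ⟨by omega, hP⟩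
      rw [if_congr hiff rfl rfl]
    | false =>
      rw [if_neg (by simp)]
      cases hedge : e last k with
      | false =>
        rw [if_neg (by simp)]
        refine ⟨ihsz, fun S l hS hl => ?_⟩
        rw [ihval S l hS hl]
        have hiff : (l < k + 1 ∧ M.testBit l = false ∧ S = M ||| 1 <<< l ∧ e last l = true) ↔
            (l < k ∧ M.testBit l = false ∧ S = M ||| 1 <<< l ∧ e last l = true) := by
          constructor
          · rintro ⟨h1, hP⟩
            rcases Nat.lt_succ_iff_lt_or_eq.mp h1 with h3 | h3
            · exact ⟨h3, hP⟩
            · subst h3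
              rw [hedge] at hP
              exact absurd hP.2.2 Bool.false_ne_true
          · rintro ⟨h1, hP⟩; exact ⟨by omega, hP⟩
        rw [if_congr hiff rfl rfl]
      | true =>
        rw [if_pos rfl]
        have htgt : (M ||| 1 <<< k) * n + k <
            ((List.range k).foldl
              (fun dp nxt =>
                if M.testBit nxt then dp
                else if e last nxt then
                  aset dp ((M ||| 1 <<< nxt) * n + nxt) (aget dp ((M ||| 1 <<< nxt) * n + nxt) + c)
                else dp)
              dp).size := by
          rw [ihsz]; exact idx_lt (or_pow_lt' hM (by omega)) (by omega)
        refine ⟨by rw [size_aset, ihsz], fun S l hS hl => ?_⟩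
        rw [aget_aset _ _ _ htgt _]
        by_cases hidx : S * n + l = (M ||| 1 <<< k) * n + k
        · obtain ⟨hS', hl'⟩ := idx_inj hl (by omega) hidx
          subst hl'
          rw [if_pos hidx, ihval (M ||| 1 <<< l) l (or_pow_lt' hM hl) hl]
          rw [if_neg (by rintro ⟨h1, -⟩; omega)]
          rw [hS']
          rw [if_pos ⟨by omega, hbit, rfl, hedge⟩]
          ring
        · rw [if_neg hidx, ihval S l hS hl]
          have hiff : (l < k + 1 ∧ M.testBit l = false ∧ S = M ||| 1 <<< l ∧ e last l = true) ↔
              (l < k ∧ M.testBit l = false ∧ S = M ||| 1 <<< l ∧ e last l = true) := by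
            constructor
            · rintro ⟨h1, hP⟩
              rcases Nat.lt_succ_iff_lt_or_eq.mp h1 with h3 | h3
              · exact ⟨h3, hP⟩
              · subst h3; exact absurd (by rw [hP.2.1]) hidx
            · rintro ⟨h1, hP⟩; exact ⟨by omega, hP⟩
          rw [if_congr hiff rfl rfl]

theorem inner_inv (n : Nat) (e : Nat → Nat → Bool) (M last : Nat) (c : Int) (dp : Array Int)
    (hsz : dp.size = 2 ^ n * n) (hM : M < 2 ^ n) :
    (pushInner n e M last c dp).size = 2 ^ n * n ∧
      ∀ S l, S < 2 ^ n → l < n →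
        aget (pushInner n e M last c dp) (S * n + l) =
          aget dp (S * n + l) +
            (if M.testBit l = false ∧ S = M ||| 1 <<< l ∧ e last l = true then c else 0) := by
  obtain ⟨hsz', hval⟩ := inner_inv_aux n e M last c dp hsz hM n (le_refl n)
  refine ⟨by unfold pushInner; exact hsz', fun S l hS hl => ?_⟩
  unfold pushInner
  rw [hval S l hS hl]
  have hiff : (l < n ∧ M.testBit l = false ∧ S = M ||| 1 <<< l ∧ e last l = true) ↔
      (M.testBit l = false ∧ S = M ||| 1 <<< l ∧ e last l = true) :=
    ⟨fun h => h.2, fun h => ⟨hl, h⟩⟩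
  rw [if_congr hiff rfl rfl]

theorem middle_inv_aux (n : Nat) (e : Nat → Nat → Bool) (M : Nat) (dp : Array Int)
    (hsz : dp.size = 2 ^ n * n) (hM : M < 2 ^ n) (k : Nat) (hk : k ≤ n) :
    ((List.range k).foldl
        (fun dp last =>
          let c := aget dp (M * n + last)
          if c = 0 then dp else pushInner n e M last c dp)
        dp).size = 2 ^ n * n ∧
      ∀ S l, S < 2 ^ n → l < n →
        aget ((List.range k).foldl
          (fun dp last =>
            let c := aget dp (M * n + last)
            if c = 0 then dp else pushInner n e M last c dp)
          dp) (S * n + l) =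
          aget dp (S * n + l) +
            (if M.testBit l = false ∧ S = M ||| 1 <<< l then
              sumLst (fun p => if e p l = true then aget dp (M * n + p) else 0) (List.range k)
            else 0) := by
  induction k with
  | zero =>
    refine ⟨hsz, fun S l hS hl => ?_⟩
    simp [sumLst]
  | succ k ih =>
    obtain ⟨ihsz, ihval⟩ := ih (by omega)
    rw [List.range_succ, List.foldl_append]
    simp only [List.foldl_cons, List.foldl_nil]
    have hMk : ¬ (M.testBit k = false ∧ M = M ||| 1 <<< k) := by
      rintro ⟨hb, hEq⟩
      exact (or_ne_self hb) hEq.symm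
    have hck : aget ((List.range k).foldl
        (fun dp last =>
          let c := aget dp (M * n + last)
          if c = 0 then dp else pushInner n e M last c dp)
        dp) (M * n + k) = aget dp (M * n + k) := by
      rw [ihval M k hM (by omega), if_neg hMk]
      ring
    set dpk := (List.range k).foldl
        (fun dp last =>
          let c := aget dp (M * n + last)
          if c = 0 then dp else pushInner n e M last c dp)
        dp with hdpk
    show (if aget dpk (M * n + k) = 0 then dpk else pushInner n e M k (aget dpk (M * n + k)) dpk).size
        = 2 ^ n * n ∧ _
    by_cases hc : aget dpk (M * n + k) = 0
    · rw [if_pos hc]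
      refine ⟨ihsz, fun S l hS hl => ?_⟩
      rw [ihval S l hS hl, sumLst_append]
      have hsing : sumLst (fun p => if e p l = true then aget dp (M * n + p) else 0) [k]
          = (if e k l = true then aget dp (M * n + k) else 0) := by
        simp [sumLst]
      rw [hsing]
      have hterm : (if e k l = true then aget dp (M * n + k) else 0) = 0 := by
        rw [← hck, hc]
        split <;> rfl
      rw [hterm]
      by_cases hC : M.testBit l = false ∧ S = M ||| 1 <<< l
      · rw [if_pos hC, if_pos hC]; ring
      · rw [if_neg hC, if_neg hC]
    · rw [if_neg hc]
      obtain ⟨isz, ival⟩ := inner_inv n e M k (aget dpk (M * n + k)) dpk ihsz hM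
      refine ⟨isz, fun S l hS hl => ?_⟩
      have hsing : sumLst (fun p => if e p l = true then aget dp (M * n + p) else 0) [k]
          = (if e k l = true then aget dp (M * n + k) else 0) := by
        simp [sumLst]
      rw [ival S l hS hl, ihval S l hS hl, sumLst_append, hsing, hck]
      by_cases hC : M.testBit l = false ∧ S = M ||| 1 <<< l
      · rw [if_pos hC, if_pos hC]
        by_cases he : e k l = true
        · rw [if_pos ⟨hC.1, hC.2, he⟩, if_pos he]; ring
        · rw [if_neg (fun hx => he hx.2.2), if_neg he]; ring
      · rw [if_neg hC, if_neg hC, if_neg (fun hx => hC ⟨hx.1, hx.2.1⟩)]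
        ring

theorem middle_inv (n : Nat) (e : Nat → Nat → Bool) (M : Nat) (dp : Array Int)
    (hsz : dp.size = 2 ^ n * n) (hM : M < 2 ^ n) :
    (pushMiddle n e M dp).size = 2 ^ n * n ∧
      ∀ S l, S < 2 ^ n → l < n →
        aget (pushMiddle n e M dp) (S * n + l) =
          aget dp (S * n + l) +
            (if M.testBit l = false ∧ S = M ||| 1 <<< l then
              sumLst (fun p => if e p l = true then aget dp (M * n + p) else 0) (List.range n)
            else 0) := by
  obtain ⟨hsz', hval⟩ := middle_inv_aux n e M dp hsz hM n (le_refl n)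
  exact ⟨by unfold pushMiddle; exact hsz', fun S l hS hl => by unfold pushMiddle; exact hval S l hS hl⟩

theorem cellSpec_row (n : Nat) (e : Nat → Nat → Bool) (iv : Nat → Int) (M p : Nat) :
    cellSpec n e iv M M p = recDP n e iv M p := by
  unfold cellSpec
  cases hb : M.testBit p with
  | true => rw [if_pos ⟨rfl, xor_pow_lt p hb⟩]
  | false =>
    rw [if_neg (fun hx => Bool.false_ne_true hx.1), recDP_not hb]

theorem step_inv (n : Nat) (e : Nat → Nat → Bool) (iv : Nat → Int) (M : Nat) (dp : Array Int)
    (h1 : 1 ≤ M) (hM : M < 2 ^ n) (hinv : DPInv n e iv M dp) :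
    DPInv n e iv (M + 1) (pushMiddle n e M dp) := by
  obtain ⟨hsz, hval⟩ := hinv
  obtain ⟨msz, mval⟩ := middle_inv n e M dp hsz hM
  refine ⟨msz, fun S l hS hl => ?_⟩
  rw [mval S l hS hl, hval S l hS hl]
  have hrowsum : sumLst (fun p => if e p l = true then aget dp (M * n + p) else 0) (List.range n)
      = sumLst (fun p => if e p l = true then recDP n e iv M p else 0) (List.range n) := by
    apply sumLst_congr
    intro p hp
    rw [hval M p hM (List.mem_range.mp hp), cellSpec_row]
  rw [hrowsum]
  by_cases hC : M.testBit l = false ∧ S = M ||| 1 <<< l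
  · obtain ⟨hb, hSeq⟩ := hC
    have ht : S.testBit l = true := by rw [hSeq]; exact or_self_testBit M l
    have hxM : S ^^^ 1 <<< l = M := by rw [hSeq]; exact or_xor_cancel l hb
    have hcell0 : cellSpec n e iv M S l = 0 := by
      unfold cellSpec
      rw [if_neg (fun hx => by rw [hxM] at hx; omega)]
    have hcell1 : cellSpec n e iv (M + 1) S l = recDP n e iv S l := by
      unfold cellSpec
      rw [if_pos ⟨ht, by rw [hxM]; omega⟩]
    rw [hcell0, hcell1, if_pos ⟨hb, hSeq⟩]
    rw [recDP]
    rw [dif_pos ht, if_neg (by rw [hSeq]; exact or_ne_pow h1 hb), foldl_ite_sum]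
    rw [hxM, zero_add]
    refine sumLst_congr (fun p hp => ?_)
    by_cases hpl : p = l
    · subst hpl
      rw [show recDP n e iv M p = 0 from recDP_not hb]
      simp
    · have hbp : S.testBit p = M.testBit p := by
        rw [hSeq, or_testBit]
        have hlp : ¬ l = p := fun hh => hpl hh.symm
        simp [hlp]
      cases hMp : M.testBit p with
      | true =>
        have hSp : S.testBit p = true := by rw [hbp, hMp]
        by_cases he : e p l = true
        · rw [if_pos he, if_pos ⟨hpl, hSp, he⟩]
        · rw [if_neg he, if_neg (fun hx => he hx.2.2)]
      | false =>
        rw [show recDP n e iv M p = 0 from recDP_not hMp]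
        simp
  · rw [if_neg hC]
    unfold cellSpec
    by_cases ht : S.testBit l = true
    · have hxne : S ^^^ 1 <<< l ≠ M := by
        intro hx
        refine hC ⟨?_, ?_⟩
        · rw [← hx, xor_testBit]; simp [ht]
        · rw [← hx, xor_or_cancel l ht]
      by_cases hlt : S ^^^ 1 <<< l < M
      · rw [if_pos ⟨ht, hlt⟩, if_pos ⟨ht, by omega⟩]; ring
      · rw [if_neg (fun hx => hlt hx.2), if_neg (fun hx => by
          have := hx.2
          rcases Nat.lt_succ_iff_lt_or_eq.mp this with h3 | h3
          · exact hlt h3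
          · exact hxne h3)]
        ring
    · rw [if_neg (fun hx => ht hx.1), if_neg (fun hx => ht hx.1)]
      ring

theorem pushDP_inv_aux (n : Nat) (e : Nat → Nat → Bool) (iv : Nat → Int) (k : Nat)
    (hk : k ≤ 2 ^ n - 1) :
    DPInv n e iv (1 + k)
      ((List.range' 1 k).foldl (fun dp M => pushMiddle n e M dp)
        ((List.range n).foldl (fun dp v => aset dp ((1 <<< v) * n + v) (iv v))
          (Array.replicate (2 ^ n * n) 0))) := by
  induction k with
  | zero => exact init_inv n e iv
  | succ k ih =>
    have hpow : 1 ≤ 2 ^ n := Nat.one_le_two_pow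
    rw [List.range'_concat, List.foldl_append]
    simp only [List.foldl_cons, List.foldl_nil, Nat.one_mul]
    have hstep := step_inv n e iv (1 + k) _ (by omega) (by omega) (ih (by omega))
    have : (1 + k) + 1 = 1 + (k + 1) := by omega
    rw [← this]
    exact hstep

theorem pushDP_inv (n : Nat) (e : Nat → Nat → Bool) (iv : Nat → Int) :
    DPInv n e iv (2 ^ n) (pushDP n e iv) := by
  have hpow : 1 ≤ 2 ^ n := Nat.one_le_two_pow
  have h := pushDP_inv_aux n e iv (2 ^ n - 1) (le_refl _)
  have heq : 1 + (2 ^ n - 1) = 2 ^ n := by omega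
  rw [heq] at h
  unfold pushDP
  exact h

theorem pushDP_cell (n : Nat) (e : Nat → Nat → Bool) (iv : Nat → Int) (S l : Nat)
    (hS : S < 2 ^ n) (hl : l < n) :
    aget (pushDP n e iv) (S * n + l) = recDP n e iv S l := by
  obtain ⟨hsz, hc⟩ := pushDP_inv n e iv
  rw [hc S l hS hl]
  unfold cellSpec
  by_cases hT : S.testBit l = true
  · have := xor_pow_lt l hT
    simp [hT, Nat.lt_of_lt_of_le this (Nat.le_of_lt hS)]
  · simp [hT, recDP_not (Bool.eq_false_iff.mpr (by simpa using hT))]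

theorem ham_eq : ∀ T, hamCount T = hamCountAlt T := by
  intro T
  unfold hamCount hamCountAlt
  refine PySem.List.foldl_congr_mem _ _ _ 0 (fun s l hl => ?_)
  rw [pushDP_cell 8 _ _ 255 l (by norm_num) (List.mem_range.mp hl)]

theorem cdc_eq : ∀ T combo, countDirectedCycles T combo = countDirectedCyclesAlt T combo := by
  intro T combo
  unfold countDirectedCycles countDirectedCyclesAlt
  by_cases h3 : combo.length < 3
  · rw [if_pos h3, if_pos h3]
  · rw [if_neg h3, if_neg h3]
    refine PySem.List.foldl_congr_mem _ _ _ 0 (fun s li hli => ?_)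
    rw [pushDP_cell _ _ _ _ _
      (by have := Nat.one_le_two_pow (n := (combo.drop 1).length); omega)
      (List.mem_range.mp hli)]

-- aggregation: A's two-phase cycle_info pass equals B's online accumulation ------

theorem sumLst_singleton {α : Type} (f : α → Int) (y : α) : sumLst f [y] = f y := by
  simp [sumLst]

theorem sumLst_add {α : Type} (f g : α → Int) (L : List α) :
    sumLst (fun y => f y + g y) L = sumLst f L + sumLst g L := by
  induction L with
  | nil => simp [sumLst]
  | cons y ys ih => rw [sumLst_cons, sumLst_cons, sumLst_cons, ih]; ring

theorem sumLst_mul {α : Type} (f : α → Int) (k : Int) (L : List α) :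
    k * sumLst f L = sumLst (fun y => k * f y) L := by
  induction L with
  | nil => simp [sumLst]
  | cons y ys ih => rw [sumLst_cons, sumLst_cons, ← ih]; ring

theorem sumLst_map {α β : Type} (f : β → Int) (g : α → β) (L : List α) :
    sumLst f (L.map g) = sumLst (fun y => f (g y)) L := by
  unfold sumLst
  rw [List.foldl_map]

theorem foldl_ite_carry {α : Type} (c : α → Prop) [DecidablePred c] (f : α → Int) (L : List α)
    (a : Int) :
    L.foldl (fun s y => if c y then s + f y else s) a = a + sumLst (fun y => if c y then f y else 0) L := by
  rw [step_ite c f, foldl_add_init]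

theorem sumLst_getD_range (f : (Nat × Int) → Int) (L : List (Nat × Int)) :
    sumLst (fun i => f (L.getD i (0, 0))) (List.range L.length) = sumLst f L := by
  induction L with
  | nil => simp [sumLst]
  | cons y ys ih =>
    rw [show (y :: ys).length = ys.length + 1 from rfl, List.range_succ_eq_map]
    rw [sumLst_cons, sumLst_map, sumLst_cons]
    simp only [List.getD_cons_zero, List.getD_cons_succ]
    rw [ih]

/-- A's `cycle_info` list, generic in the per-combo counting function. -/
def infoOf (f : List Nat → Int) (K : List (List Nat)) : List (Nat × Int) :=
  K.foldl (fun acc combo => if f combo > 0 then acc ++ [(vmaskOf combo, f combo)] else acc) []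

/-- A's double index loop over `cycle_info`. -/
def dblLoop (L : List (Nat × Int)) : Int :=
  (List.range L.length).foldl
    (fun s i =>
      (List.range' (i + 1) (L.length - (i + 1))).foldl
        (fun s j =>
          if (L.getD i (0, 0)).1 &&& (L.getD j (0, 0)).1 = 0 then
            s + (L.getD i (0, 0)).2 * (L.getD j (0, 0)).2
          else s)
        s)
    0

theorem dblLoop_eq_sum (L : List (Nat × Int)) :
    dblLoop L =
      sumLst (fun i =>
        sumLst (fun j =>
            if (L.getD i (0, 0)).1 &&& (L.getD j (0, 0)).1 = 0 then
              (L.getD i (0, 0)).2 * (L.getD j (0, 0)).2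
            else 0)
          (List.range' (i + 1) (L.length - (i + 1))))
        (List.range L.length) := by
  unfold dblLoop
  rw [PySem.List.foldl_congr_mem _ _
    (fun s i => s + sumLst (fun j =>
        if (L.getD i (0, 0)).1 &&& (L.getD j (0, 0)).1 = 0 then
          (L.getD i (0, 0)).2 * (L.getD j (0, 0)).2
        else 0)
      (List.range' (i + 1) (L.length - (i + 1)))) 0
    (fun s i _ => foldl_ite_carry _ _ _ s)]
  rfl

theorem infoOf_append (f : List Nat → Int) (K : List (List Nat)) (k : List Nat) :
    infoOf f (K ++ [k]) =
      infoOf f K ++ (if f k > 0 then [(vmaskOf k, f k)] else []) := by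
  unfold infoOf
  rw [List.foldl_append]
  simp only [List.foldl_cons, List.foldl_nil]
  split
  · rfl
  · rw [List.append_nil]

theorem dblLoop_append (L : List (Nat × Int)) (z : Nat × Int) :
    dblLoop (L ++ [z]) =
      dblLoop L + sumLst (fun y => if y.1 &&& z.1 = 0 then y.2 * z.2 else 0) L := by
  rw [dblLoop_eq_sum, dblLoop_eq_sum]
  have hlen : (L ++ [z]).length = L.length + 1 := by simp
  rw [hlen, List.range_succ, sumLst_append, sumLst_singleton]
  have hlast : (L ++ [z]).getD L.length (0, 0) = z := by
    rw [List.getD_eq_getElem?_getD, List.getElem?_concat_length]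
    rfl
  have hempty : List.range' (L.length + 1) (L.length + 1 - (L.length + 1)) = [] := by
    simp
  rw [hempty]
  have hterm0 : sumLst (fun j =>
      if ((L ++ [z]).getD L.length (0, 0)).1 &&& ((L ++ [z]).getD j (0, 0)).1 = 0 then
        ((L ++ [z]).getD L.length (0, 0)).2 * ((L ++ [z]).getD j (0, 0)).2
      else 0) [] = 0 := by
    simp [sumLst]
  rw [hterm0, add_zero]
  have hrow : ∀ i ∈ List.range L.length,
      sumLst (fun j =>
          if ((L ++ [z]).getD i (0, 0)).1 &&& ((L ++ [z]).getD j (0, 0)).1 = 0 then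
            ((L ++ [z]).getD i (0, 0)).2 * ((L ++ [z]).getD j (0, 0)).2
          else 0)
        (List.range' (i + 1) (L.length + 1 - (i + 1))) =
      sumLst (fun j =>
          if (L.getD i (0, 0)).1 &&& (L.getD j (0, 0)).1 = 0 then
            (L.getD i (0, 0)).2 * (L.getD j (0, 0)).2
          else 0)
        (List.range' (i + 1) (L.length - (i + 1)))
      + (if (L.getD i (0, 0)).1 &&& z.1 = 0 then (L.getD i (0, 0)).2 * z.2 else 0) := by
    intro i hi
    have hi' := List.mem_range.mp hi
    have hgi : (L ++ [z]).getD i (0, 0) = L.getD i (0, 0) := List.getD_append L [z] (0, 0) i hi'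
    have hcnt : L.length + 1 - (i + 1) = (L.length - (i + 1)) + 1 := by omega
    rw [hcnt, List.range'_concat]
    have hend : i + 1 + 1 * (L.length - (i + 1)) = L.length := by omega
    rw [hend, sumLst_append, sumLst_singleton, hgi, hlast]
    congr 1
    refine sumLst_congr (fun j hj => ?_)
    have hj' : j < L.length := by
      have := List.mem_range'.mp hj
      obtain ⟨w, hw1, hw2⟩ := this
      omega
    rw [List.getD_append L [z] (0, 0) j hj']
  rw [sumLst_congr hrow, sumLst_add]
  congr 1
  exact sumLst_getD_range (fun y => if y.1 &&& z.1 = 0 then y.2 * z.2 else 0) L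

/-- B's one-pass fold carries exactly (total of, pair sum of, value of) A's list. -/
theorem online_state (f : List Nat → Int) (K : List (List Nat)) :
    K.foldl
      (fun (st : Int × Int × List (Nat × Int)) combo =>
        let cnt := f combo
        if cnt > 0 then
          let vmask := vmaskOf combo
          (st.1 + cnt,
           st.2.1 + cnt * (st.2.2.foldl (fun s y => if y.1 &&& vmask = 0 then s + y.2 else s) 0),
           st.2.2 ++ [(vmask, cnt)])
        else st)
      ((0 : Int), (0 : Int), ([] : List (Nat × Int)))
    = (sumLst (fun p => p.2) (infoOf f K), dblLoop (infoOf f K), infoOf f K) := by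
  induction K using List.reverseRecOn with
  | nil => simp [infoOf, sumLst, dblLoop]
  | append_singleton K k ih =>
    rw [List.foldl_append, ih, infoOf_append]
    simp only [List.foldl_cons, List.foldl_nil]
    by_cases hpos : f k > 0
    · rw [if_pos hpos, if_pos hpos]
      have h1 : sumLst (fun p => p.2) (infoOf f K ++ [(vmaskOf k, f k)])
          = sumLst (fun p => p.2) (infoOf f K) + f k := by
        rw [sumLst_append, sumLst_singleton]
      have h2 : dblLoop (infoOf f K ++ [(vmaskOf k, f k)])
          = dblLoop (infoOf f K) +
            f k * ((infoOf f K).foldl (fun s y => if y.1 &&& vmaskOf k = 0 then s + y.2 else s) 0) := by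
        rw [dblLoop_append, foldl_ite_carry, zero_add, sumLst_mul]
        congr 1
        refine sumLst_congr (fun y _ => ?_)
        split
        · ring
        · ring
      rw [h1, h2]
    · rw [if_neg hpos, if_neg hpos, List.append_nil]

theorem foldl_nested {α β γ : Type} (A : List α) (g : α → List β) (step : γ → β → γ) (init : γ) :
    A.foldl (fun acc x => (g x).foldl step acc) init = (A.flatMap g).foldl step init := by
  induction A generalizing init with
  | nil => rfl
  | cons a as ih => rw [List.flatMap_cons, List.foldl_append, List.foldl_cons, ih]

theorem ocf_eq : ∀ T, computeOcf T = computeOcfAlt T := by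
  intro T
  have hcdc : countDirectedCyclesAlt = countDirectedCycles :=
    funext fun T => funext fun c => (cdc_eq T c).symm
  unfold computeOcf computeOcfAlt
  rw [hcdc, foldl_nested, foldl_nested,
    online_state (fun combo => countDirectedCycles T combo)
      ((List.range' 3 3 2).flatMap fun len => pyCombinations (List.range 8) len)]
  rfl

-- ===== VERDICT (by name: the statement is the Claim_ definition above) =====
theorem verify_chunk_spec : Claim_equal_verify_chunk := by
  intro args _
  unfold Spec_verify_chunk verify_chunk verify_chunk_alt
  rw [funext ham_eq, funext ocf_eq]
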